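-- pv_equiv track=rewrite | github.com/danidiaz9/tareas-intro-a-la-progra | Tarea3.py | desencriptarEscalera
-- ===== SOURCE A (Python) =====
-- def desencriptarEscalera(msg, n, r):
--     assert type(msg) == str
--     assert type(n) == int
--     assert type(r) == int
--
--     ListaMsg = list(msg)
--     LargoMsg = len(ListaMsg)
--     Desencriptado = []
--
--     # Calcular el número de elementos por peldaño
--     elementos_por_peldaño = LargoMsg // n
--
--     # Reconstruir el mensaje original
--     i = 0
--     j = 0
--     while i < elementos_por_peldaño:
--         j = 0
--         while j < n:
--             posicion = (elementos_por_peldaño * j) + i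
--             caracter = ListaMsg[posicion]
--             Desencriptado.append(caracter)
--             j += 1
--         i += 1
--
--     # Unir el resultado y eliminar los caracteres adicionales
--     resultado = "".join(Desencriptado)
--     if r > 0:
--         resultado = resultado[:-r]
--
--     return resultado
-- ===== SOURCE B (Python) =====
-- def desencriptarEscalera(msg, n, r):
--     assert type(msg) == str
--     assert type(n) == int
--     assert type(r) == int
--     # Build the n staircase rows explicitly and transpose them with zip.
--     epp = len(msg) // n
--     if epp <= 0:
--         resultado = ''
--     else:
--         chunks = [msg[epp * j:epp * j + epp] for j in range(n)]
--         resultado = ''.join(''.join(fila) for fila in zip(*chunks))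
--     return resultado[:-r] if r > 0 else resultado
-- ===== Notes on version B (the rewrite author's own statement) =====
-- stated objective: idiomatic
-- what changed: B builds the n staircase rows as explicit string chunks and transposes the grid with zip(*chunks), instead of A's nested while loops computing flat indices character by character.
import Mathlib
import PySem

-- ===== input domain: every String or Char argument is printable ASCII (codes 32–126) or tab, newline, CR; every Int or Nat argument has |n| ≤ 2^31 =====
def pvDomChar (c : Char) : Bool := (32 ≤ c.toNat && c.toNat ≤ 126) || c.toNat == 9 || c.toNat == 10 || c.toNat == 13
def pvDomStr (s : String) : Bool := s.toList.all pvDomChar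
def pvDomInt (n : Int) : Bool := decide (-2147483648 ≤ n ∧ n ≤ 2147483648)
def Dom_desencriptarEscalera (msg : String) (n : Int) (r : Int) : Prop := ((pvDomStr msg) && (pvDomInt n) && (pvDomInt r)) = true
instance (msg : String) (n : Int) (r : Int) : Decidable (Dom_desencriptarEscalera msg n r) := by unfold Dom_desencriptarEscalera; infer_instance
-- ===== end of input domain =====

-- B decrypts the staircase cipher by building the n rows and transposing them with zip,
-- instead of A's nested index-arithmetic loops; same result on every n ≠ 0 (n = 0 raises in both).


-- ===== PORT A =====
def desencriptarEscalera (msg : String) (n : Int) (r : Int) : String :=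
  let listaMsg := msg.toList
  let largoMsg : Int := listaMsg.length
  let epp := PySem.Int.floordiv largoMsg n
  -- the nested while loops over i < epp, j < n; ListaMsg[posicion] is in range whenever
  -- the loops run (proved in the equivalence proof), so the default is never used
  let des := (PySem.List.pyRange 0 epp 1).foldl (fun acc i =>
      (PySem.List.pyRange 0 n 1).foldl (fun acc2 j =>
        acc2 ++ [PySem.List.pyGetD listaMsg (epp * j + i) ' ']) acc) []
  let resultado := des
  if r > 0 then String.ofList (PySem.List.slice resultado none (some (-r)))
  else String.ofList resultado

-- ===== PORT B =====
-- zip(*chunks): take one character from every row until some row runs out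
def pvZipStar (ls : List (List Char)) : List (List Char) :=
  if ls.isEmpty ∨ ls.any List.isEmpty then []
  else (ls.map (fun l => l.headD ' ')) :: pvZipStar (ls.map (fun l => l.drop 1))
termination_by (ls.headD []).length
decreasing_by
  rename_i h
  rw [not_or] at h
  obtain ⟨h1, h2⟩ := h
  cases ls with
  | nil => simp at h1
  | cons a t =>
    simp only [List.attach_cons, List.map_cons, List.headD_cons, List.length_drop]
    have ha : a ≠ [] := by
      intro hnil
      exact h2 (by simp [hnil])
    have : 0 < a.length := List.length_pos_iff.mpr ha
    omega

def desencriptarEscalera_alt (msg : String) (n : Int) (r : Int) : String :=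
  let s := msg.toList
  let epp := PySem.Int.floordiv (s.length : Int) n
  let resultado :=
    if epp ≤ 0 then []
    else (pvZipStar ((PySem.List.pyRange 0 n 1).map (fun j =>
      PySem.List.slice s (some (epp * j)) (some (epp * j + epp))))).flatten
  if r > 0 then String.ofList (PySem.List.slice resultado none (some (-r)))
  else String.ofList resultado

-- ===== PRECONDITION & SPEC =====
-- Pre_ excludes exactly n = 0, on which Python A raises ZeroDivisionError (B raises there too).
def Pre_desencriptarEscalera (msg : String) (n : Int) (r : Int) : Prop := n ≠ 0
instance (msg : String) (n : Int) (r : Int) : Decidable (Pre_desencriptarEscalera msg n r) := by unfold Pre_desencriptarEscalera; infer_instance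
def pvWitness_desencriptarEscalera : String × Int × Int := ("adbecf", 2, 1)

def Spec_desencriptarEscalera (msg : String) (n : Int) (r : Int) (out : String) : Prop := out = desencriptarEscalera_alt msg n r
instance (msg : String) (n : Int) (r : Int) (out : String) : Decidable (Spec_desencriptarEscalera msg n r out) := by unfold Spec_desencriptarEscalera; infer_instance

-- ===== CLAIM (what is proved, stated in full; the proofs are below) =====
def Claim_equal_desencriptarEscalera : Prop := ∀ (msg : String) (n : Int) (r : Int), Dom_desencriptarEscalera msg n r → Pre_desencriptarEscalera msg n r → Spec_desencriptarEscalera msg n r (desencriptarEscalera msg n r)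

-- ===== LEMMAS AND PROOFS =====

-- zipStar of a nonempty list of lists all of length m is the m×|ls| transpose
theorem pvZipStar_uniform (m : Nat) (ls : List (List Char)) (hne : ls ≠ [])
    (hlen : ∀ l ∈ ls, l.length = m) :
    pvZipStar ls = (List.range m).map (fun i => ls.map (fun l => l.getD i ' ')) := by
  induction m generalizing ls with
  | zero =>
    rw [pvZipStar]
    have : ls.any List.isEmpty := by
      cases ls with
      | nil => exact absurd rfl hne
      | cons a t =>
        simp only [List.any_cons, Bool.or_eq_true]
        left
        simpa [List.isEmpty_iff, List.length_eq_zero_iff] using hlen a (List.mem_cons_self)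
    simp [this]
  | succ k ih =>
    rw [pvZipStar]
    have hno : ¬ (ls.isEmpty ∨ ls.any List.isEmpty) := by
      rintro (h | h)
      · exact hne (List.isEmpty_iff.mp h)
      · obtain ⟨l, hl, hl2⟩ := List.any_eq_true.mp h
        have := hlen l hl
        rw [List.isEmpty_iff] at hl2
        rw [hl2] at this; simp at this
    rw [if_neg hno]
    have hmap : ∀ l ∈ ls.map (fun l => l.drop 1), l.length = k := by
      intro l hl
      obtain ⟨l', hl', rfl⟩ := List.mem_map.mp hl
      have := hlen l' hl'
      simp [this]
    have hmne : ls.map (fun l => l.drop 1) ≠ [] := by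
      simpa using hne
    rw [ih _ hmne hmap, List.range_succ_eq_map]
    simp only [List.map_cons, List.map_map, List.cons.injEq]
    constructor
    · apply List.map_congr_left
      intro l hl
      have hlen' := hlen l hl
      cases l with
      | nil => simp at hlen'
      | cons c cs => simp
    · apply List.map_congr_left
      intro i _
      simp only [Function.comp]
      apply List.map_congr_left
      intro l hl
      have hlen' := hlen l hl
      cases l with
      | nil => simp at hlen'
      | cons c cs => simp

-- the two ports produce the same character list before the final trim
theorem pvCore (s : List Char) (n : Int) (hn : n ≠ 0) :
    (PySem.List.pyRange 0 (PySem.Int.floordiv (s.length : Int) n) 1).foldl (fun acc i =>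
        (PySem.List.pyRange 0 n 1).foldl (fun acc2 j =>
          acc2 ++ [PySem.List.pyGetD s (PySem.Int.floordiv (s.length : Int) n * j + i) ' ']) acc) []
    = (if PySem.Int.floordiv (s.length : Int) n ≤ 0 then []
      else (pvZipStar ((PySem.List.pyRange 0 n 1).map (fun j =>
        PySem.List.slice s (some (PySem.Int.floordiv (s.length : Int) n * j))
          (some (PySem.Int.floordiv (s.length : Int) n * j + PySem.Int.floordiv (s.length : Int) n))))).flatten) := by
  rcases lt_or_gt_of_ne hn with hneg | hpos
  · -- n < 0: both sides are empty
    have h2 : PySem.Int.floordiv (s.length : Int) n ≤ 0 := by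
      show Int.fdiv _ _ ≤ 0
      rw [Int.fdiv_eq_ediv]
      have := Int.ediv_nonpos_of_nonneg_of_nonpos (a := (s.length : Int)) (by positivity) (le_of_lt hneg)
      omega
    have h3 : PySem.List.pyRange 0 (PySem.Int.floordiv (s.length : Int) n) 1 = [] :=
      PySem.List.pyRange_one_eq_nil h2
    rw [h3, if_pos h2]
    simp
  · -- n > 0
    obtain ⟨N, rfl⟩ : ∃ N : Nat, n = (N : Int) :=
      ⟨n.toNat, (Int.toNat_of_nonneg (le_of_lt hpos)).symm⟩
    have hN : 0 < N := by exact_mod_cast hpos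
    have hE : PySem.Int.floordiv (s.length : Int) (N : Int) = ((s.length / N : Nat) : Int) :=
      PySem.Int.floordiv_natCast s.length N
    rw [hE]
    by_cases hE0 : s.length / N = 0
    · rw [hE0, if_pos (by norm_num)]
      simp [hE0]
    rw [if_neg (by exact_mod_cast Nat.pos_of_ne_zero hE0 |> Int.natCast_pos.mpr |> not_le_of_gt)]
    have hbound : ∀ k, k < N → s.length / N * k + s.length / N ≤ s.length := by
      intro k hk
      calc s.length / N * k + s.length / N = s.length / N * (k + 1) := by ring
        _ ≤ s.length / N * N := Nat.mul_le_mul_left _ hk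
        _ ≤ s.length := Nat.div_mul_le_self _ N
    have hchunk : ∀ k : Nat,
        PySem.List.slice s (some (((s.length / N : Nat) : Int) * (k : Int)))
          (some (((s.length / N : Nat) : Int) * (k : Int) + ((s.length / N : Nat) : Int)))
          = (s.drop (s.length / N * k)).take (s.length / N) := by
      intro k
      have e2 : ((s.length / N : Nat) : Int) * (k : Int) + ((s.length / N : Nat) : Int)
          = ((s.length / N * k + s.length / N : Nat) : Int) := by push_cast; ring
      have e1 : ((s.length / N : Nat) : Int) * (k : Int)
          = ((s.length / N * k : Nat) : Int) := by push_cast; ring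
      rw [e2, e1, PySem.List.slice_toNat s (by positivity) (by positivity),
        Int.toNat_natCast, Int.toNat_natCast]
      rw [Nat.add_sub_cancel_left]
    rw [PySem.List.pyRange_zero_nat N, PySem.List.pyRange_zero_nat (s.length / N)]
    simp only [PySem.List.foldl_append_singleton_eq_map, PySem.List.foldl_append_eq_flatMap,
      List.nil_append, List.map_map]
    have hchunks :
        List.map ((fun j : Int => PySem.List.slice s (some (((s.length / N : Nat) : Int) * j))
            (some (((s.length / N : Nat) : Int) * j + ((s.length / N : Nat) : Int))))
            ∘ (fun k : Nat => (k : Int))) (List.range N)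
          = List.map (fun k : Nat => (s.drop (s.length / N * k)).take (s.length / N)) (List.range N) :=
      List.map_congr_left (fun k _ => hchunk k)
    rw [hchunks]
    have hlens : ∀ l ∈ (List.range N).map (fun k => (s.drop (s.length / N * k)).take (s.length / N)),
        l.length = s.length / N := by
      intro l hl
      obtain ⟨k, hk, rfl⟩ := List.mem_map.mp hl
      rw [List.mem_range] at hk
      have := hbound k hk
      simp only [List.length_take, List.length_drop]
      omega
    have hne : (List.range N).map (fun k => (s.drop (s.length / N * k)).take (s.length / N)) ≠ [] := by
      simp only [ne_eq, List.map_eq_nil_iff, List.range_eq_nil]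
      omega
    rw [pvZipStar_uniform (s.length / N) _ hne hlens, List.flatMap_map, List.flatMap_def]
    congr 1
    apply List.map_congr_left
    intro i hi
    rw [List.mem_range] at hi
    simp only [List.map_map]
    apply List.map_congr_left
    intro k _
    simp only [Function.comp_apply]
    have e3 : ((s.length / N : Nat) : Int) * (k : Int) + (i : Int)
        = ((s.length / N * k + i : Nat) : Int) := by push_cast; ring
    rw [e3, PySem.List.pyGetD_natCast,
      List.getD_eq_getElem?_getD, List.getD_eq_getElem?_getD,
      List.getElem?_take, if_pos hi, List.getElem?_drop]

-- ===== VERDICT (by name: the statement is the Claim_ definition above) =====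
theorem desencriptarEscalera_spec : Claim_equal_desencriptarEscalera := by
  intro msg n r _ hn
  unfold Spec_desencriptarEscalera desencriptarEscalera desencriptarEscalera_alt
  simp only [pvCore msg.toList n hn]
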